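-- pv_equiv track=rewrite | github.com/Herme02/Programacion-2022-2023- | ejercicio2Funciones/ejercicio10.py | isFriendNumber
-- ===== SOURCE A (Python) =====
-- def isFriendNumber(num1, num2):
--     result = False
--
--     sumaNum1 = 0
--
--     for i in range(1, num1):
--         sumaNum1 += i
--
--     if(sumaNum1 == num2):
--         result = True
--
--     return result
-- ===== SOURCE B (Python) =====
-- def isFriendNumber(num1, num2):
--     # Closed form: sum of 1..num1-1 is the triangular number num1*(num1-1)//2
--     # (empty sum, i.e. 0, when num1 <= 1).
--     total = num1 * (num1 - 1) // 2 if num1 > 1 else 0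
--     return total == num2
-- ===== Notes on version B (the rewrite author's own statement) =====
-- stated objective: faster
-- what changed: Replaced the O(num1) summation loop with the closed-form triangular number num1*(num1-1)//2 (0 for num1 <= 1) compared against num2.
import Mathlib
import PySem

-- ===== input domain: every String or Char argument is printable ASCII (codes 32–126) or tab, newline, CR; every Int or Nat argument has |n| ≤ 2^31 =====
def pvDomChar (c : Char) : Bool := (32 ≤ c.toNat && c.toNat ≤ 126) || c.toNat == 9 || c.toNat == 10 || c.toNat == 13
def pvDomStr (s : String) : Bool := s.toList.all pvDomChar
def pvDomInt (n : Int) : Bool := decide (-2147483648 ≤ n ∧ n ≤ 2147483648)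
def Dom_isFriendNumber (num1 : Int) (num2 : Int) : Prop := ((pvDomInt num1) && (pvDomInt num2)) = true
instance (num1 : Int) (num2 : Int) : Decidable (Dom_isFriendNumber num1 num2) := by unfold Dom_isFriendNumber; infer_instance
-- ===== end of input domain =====

-- B replaces A's O(num1) summation loop by the closed-form triangular number num1*(num1-1)//2 (O(1)).

-- ===== PORT A =====
def isFriendNumber (num1 : Int) (num2 : Int) : Bool :=
  let result := false
  let sumaNum1 : Int := (PySem.List.pyRange 1 num1 1).foldl (fun s i => s + i) 0
  let result := if sumaNum1 == num2 then true else result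
  result

-- ===== PORT B =====
def isFriendNumber_alt (num1 : Int) (num2 : Int) : Bool :=
  let total : Int := if num1 > 1 then PySem.Int.floordiv (num1 * (num1 - 1)) 2 else 0
  total == num2

-- ===== PRECONDITION & SPEC =====
def Spec_isFriendNumber (num1 : Int) (num2 : Int) (out : Bool) : Prop := out = isFriendNumber_alt num1 num2
instance (num1 : Int) (num2 : Int) (out : Bool) : Decidable (Spec_isFriendNumber num1 num2 out) := by unfold Spec_isFriendNumber; infer_instance

-- ===== CLAIM (what is proved, stated in full; the proofs are below) =====
def Claim_equal_isFriendNumber : Prop := ∀ (num1 : Int) (num2 : Int), Dom_isFriendNumber num1 num2 → Spec_isFriendNumber num1 num2 (isFriendNumber num1 num2)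

-- ===== LEMMAS AND PROOFS =====

-- the loop's sum over range(1, m+1) (m naturals) is the triangular number
lemma sum_range_map_succ (m : Nat) :
    ((List.range m).map (fun k : Nat => (1 : Int) + (k : Int))).foldl (fun s i => s + i) 0
      = ((m * (m + 1) / 2 : Nat) : Int) := by
  induction m with
  | zero => simp
  | succ m ih =>
    rw [List.range_succ, List.map_append, List.foldl_append, ih]
    simp only [List.map_cons, List.map_nil, List.foldl_cons, List.foldl_nil]
    have e : (m + 1) * (m + 1 + 1) = m * (m + 1) + 2 * (m + 1) := by ring
    have h : (m + 1) * (m + 1 + 1) / 2 = m * (m + 1) / 2 + (m + 1) := by omega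
    push_cast [h]
    ring

lemma loop_sum_eq (num1 : Int) :
    (PySem.List.pyRange 1 num1 1).foldl (fun s i => s + i) 0
      = (if num1 > 1 then PySem.Int.floordiv (num1 * (num1 - 1)) 2 else 0) := by
  rw [PySem.List.pyRange_one, sum_range_map_succ]
  by_cases h : num1 > 1
  · simp only [h, if_pos]
    obtain ⟨m, hm⟩ : ∃ m : Nat, num1 - 1 = (m : Int) :=
      ⟨(num1 - 1).toNat, by omega⟩
    have h1 : num1 = (m : Int) + 1 := by omega
    have h2 : (num1 - 1).toNat = m := by omega
    rw [h2, h1]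
    have : ((m : Int) + 1) * ((m : Int) + 1 - 1) = ((m * (m + 1) : Nat) : Int) := by
      push_cast; ring
    rw [this]
    rw [show ((2 : Int)) = ((2 : Nat) : Int) from rfl, PySem.Int.floordiv_natCast]
  · simp only [h, if_false]
    have : (num1 - 1).toNat = 0 := by omega
    simp [this]

-- ===== VERDICT (by name: the statement is the Claim_ definition above) =====
theorem isFriendNumber_spec : Claim_equal_isFriendNumber := by
  intro num1 num2 _
  unfold Spec_isFriendNumber isFriendNumber isFriendNumber_alt
  simp only [loop_sum_eq]
  cases h : (if num1 > 1 then PySem.Int.floordiv (num1 * (num1 - 1)) 2 else 0) == num2 <;> simp [h]  -- both branches close
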